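-- pv_equiv track=rewrite | github.com/Chow89/Damerau-Levenshtein-distance | dld.py | dld
-- ===== SOURCE A (Python) =====
-- def dld(a,b,i,j):
-- 	if min(i,j)==0:
-- 		return max(i,j)
-- 	elif i>1 and j>1 and a[i-1]==b[j-2] and a[i-2]==b[j-1]:
-- 		cost = 1 if a[i-1]!=b[j-1] else 0
-- 		return min(dld(a,b,i-1,j)+1,dld(a,b,i,j-1)+1,dld(a,b,i-1,j-1)+cost, dld(a,b,i-2,j-2)+1)
-- 	else:
-- 		cost = 1 if a[i-1]!=b[j-1] else 0
-- 		return min(dld(a,b,i-1,j)+1,dld(a,b,i,j-1)+1,dld(a,b,i-1,j-1)+cost)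
-- ===== SOURCE B (Python) =====
-- def dld(a, b, i, j):
--     if min(i, j) == 0:
--         return max(i, j)
--     prev2 = []
--     prev = list(range(j + 1))
--     for x in range(1, i + 1):
--         cur = [x]
--         for y in range(1, j + 1):
--             cost = 0 if a[x - 1] == b[y - 1] else 1
--             d = min(prev[y] + 1, cur[y - 1] + 1, prev[y - 1] + cost)
--             if x > 1 and y > 1 and a[x - 1] == b[y - 2] and a[x - 2] == b[y - 1]:
--                 d = min(d, prev2[y - 2] + 1)
--             cur.append(d)
--         prev2, prev = prev, cur
--     return prev[j]
-- ===== Notes on version B (the rewrite author's own statement) =====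
-- stated objective: faster
-- what changed: Replaced A's exponential three/four-way recursion by a bottom-up dynamic-programming table kept as two rolling rows (plus the transposition row), computing each prefix distance once.
import Mathlib
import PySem

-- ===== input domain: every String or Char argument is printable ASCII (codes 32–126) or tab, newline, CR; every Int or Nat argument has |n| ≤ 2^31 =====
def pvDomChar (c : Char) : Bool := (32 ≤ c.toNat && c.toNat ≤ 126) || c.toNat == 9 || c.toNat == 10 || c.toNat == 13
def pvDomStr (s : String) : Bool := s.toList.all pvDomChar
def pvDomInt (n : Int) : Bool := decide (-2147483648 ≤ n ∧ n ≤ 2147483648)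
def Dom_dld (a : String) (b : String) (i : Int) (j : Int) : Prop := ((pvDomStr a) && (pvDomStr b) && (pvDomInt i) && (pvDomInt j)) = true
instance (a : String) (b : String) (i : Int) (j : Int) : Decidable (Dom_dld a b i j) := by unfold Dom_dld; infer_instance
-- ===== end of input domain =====

-- B replaces A's exponential three/four-way recursion by a bottom-up two-row DP table (asymptotic speed-up).

-- ===== PORT A =====
-- Literal port of A's recursion.  Python tests 'min(i,j)==0'; the port's guard 'min i j ≤ 0'
-- only makes the recursion total — for negative i or j Python recurses without bound
-- (RecursionError), which Pre_dld excludes.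
def dld (a : String) (b : String) (i : Int) (j : Int) : Int :=
  if min i j ≤ 0 then max i j
  else if 1 < i ∧ 1 < j ∧ PySem.Str.pyGet? a (i-1) = PySem.Str.pyGet? b (j-2)
          ∧ PySem.Str.pyGet? a (i-2) = PySem.Str.pyGet? b (j-1) then
    let cost : Int := if PySem.Str.pyGet? a (i-1) ≠ PySem.Str.pyGet? b (j-1) then 1 else 0
    min (min (min (dld a b (i-1) j + 1) (dld a b i (j-1) + 1)) (dld a b (i-1) (j-1) + cost))
        (dld a b (i-2) (j-2) + 1)
  else
    let cost : Int := if PySem.Str.pyGet? a (i-1) ≠ PySem.Str.pyGet? b (j-1) then 1 else 0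
    min (min (dld a b (i-1) j + 1) (dld a b i (j-1) + 1)) (dld a b (i-1) (j-1) + cost)
termination_by (i + j).toNat
decreasing_by all_goals omega

-- ===== PORT B =====
-- the body of B's inner loop: computes cell (x,y) from the two previous rows and appends it
def dldAltStep (a : String) (b : String) (x : Int) (prev2 : List Int) (prev : List Int)
    (cur : List Int) (y : Int) : List Int :=
  let cost : Int := if PySem.Str.pyGet? a (x-1) = PySem.Str.pyGet? b (y-1) then 0 else 1
  let d := min (min (PySem.List.pyGetD prev y 0 + 1) (PySem.List.pyGetD cur (y-1) 0 + 1))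
               (PySem.List.pyGetD prev (y-1) 0 + cost)
  let d' := if 1 < x ∧ 1 < y ∧ PySem.Str.pyGet? a (x-1) = PySem.Str.pyGet? b (y-2)
               ∧ PySem.Str.pyGet? a (x-2) = PySem.Str.pyGet? b (y-1)
            then min d (PySem.List.pyGetD prev2 (y-2) 0 + 1) else d
  cur ++ [d']

-- Literal port of Source B: early exit, then the two-row DP; 'prev[j]' is in range on Pre_dld,
-- ported with pyGetD (default never read inside Pre_dld).
def dld_alt (a : String) (b : String) (i : Int) (j : Int) : Int :=
  if min i j = 0 then max i j
  else
    let st := (PySem.List.pyRange 1 (i+1) 1).foldl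
      (fun (s : List Int × List Int) x =>
        (s.2, (PySem.List.pyRange 1 (j+1) 1).foldl (dldAltStep a b x s.1 s.2) [x]))
      (([] : List Int), PySem.List.pyRange 0 (j+1) 1)
    PySem.List.pyGetD st.2 j 0

-- ===== PRECONDITION & SPEC =====
-- Exactly where Python A returns: if i=0 or j=0 (with the other ≥ 0) it returns max(i,j) at once;
-- otherwise both prefix lengths must be in range (else IndexError) and nonnegative (else
-- unbounded recursion, RecursionError).
def Pre_dld (a : String) (b : String) (i : Int) (j : Int) : Prop :=
  0 ≤ i ∧ 0 ≤ j ∧ ((i ≤ PySem.Str.len a ∧ j ≤ PySem.Str.len b) ∨ i = 0 ∨ j = 0)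
instance (a : String) (b : String) (i : Int) (j : Int) : Decidable (Pre_dld a b i j) := by
  unfold Pre_dld; infer_instance
def pvWitness_dld : String × String × Int × Int := ("abc", "cab", 3, 3)
def Spec_dld (a : String) (b : String) (i : Int) (j : Int) (out : Int) : Prop := out = dld_alt a b i j
instance (a : String) (b : String) (i : Int) (j : Int) (out : Int) : Decidable (Spec_dld a b i j out) := by
  unfold Spec_dld; infer_instance

-- ===== CLAIM (what is proved, stated in full; the proofs are below) =====
def Claim_equal_dld : Prop := ∀ (a : String) (b : String) (i : Int) (j : Int),
  Dom_dld a b i j → Pre_dld a b i j → Spec_dld a b i j (dld a b i j)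

-- ===== LEMMAS AND PROOFS =====

-- row x of the DP table, as values of A, indices 0..n
def rowD (a : String) (b : String) (x : Int) (n : Nat) : List Int :=
  (List.range (n+1)).map (fun (t : Nat) => dld a b x (t : Int))

lemma dld_zero_right (a b : String) (x : Int) (hx : 0 ≤ x) : dld a b x 0 = x := by
  rw [dld]; rw [if_pos (by omega : min x 0 ≤ 0)]; omega

lemma dld_zero_left (a b : String) (y : Int) (hy : 0 ≤ y) : dld a b 0 y = y := by
  rw [dld]; rw [if_pos (by omega : min 0 y ≤ 0)]; omega

lemma rowD_get (a b : String) (x : Int) (n : Nat) (t : Nat) (ht : t ≤ n) :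
    PySem.List.pyGetD (rowD a b x n) ((t : Int)) 0 = dld a b x t := by
  rw [rowD, PySem.List.pyGetD_natCast, List.getD_eq_getElem?_getD, List.getElem?_map]
  rw [List.getElem?_range (by omega : t < n + 1)]
  rfl

lemma rowD_getI (a b : String) (x : Int) (n : Nat) (t : Int) (h0 : 0 ≤ t) (h1 : t ≤ (n : Int)) :
    PySem.List.pyGetD (rowD a b x n) t 0 = dld a b x t := by
  obtain ⟨k, rfl⟩ := Int.eq_ofNat_of_zero_le h0
  exact rowD_get a b x n k (by omega)

lemma rowD_succ (a b : String) (x : Int) (n : Nat) :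
    rowD a b x (n+1) = rowD a b x n ++ [dld a b x ((n+1 : Nat) : Int)] := by
  rw [rowD, rowD, List.range_succ, List.map_append, List.map_singleton]

lemma inner_fold (a b : String) (J : Nat) (X : Nat) (prev2 : List Int)
    (hp2 : X = 0 ∨ prev2 = rowD a b ((X : Int) - 1) J) :
    ∀ Y : Nat, Y ≤ J →
    (PySem.List.pyRange 1 ((Y : Int) + 1) 1).foldl
        (dldAltStep a b ((X : Int) + 1) prev2 (rowD a b (X : Int) J)) [((X : Int) + 1)]
      = rowD a b ((X : Int) + 1) Y := by
  intro Y hYJ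
  induction Y with
  | zero =>
    rw [Nat.cast_zero, zero_add, PySem.List.pyRange_one_eq_nil (by omega), List.foldl_nil]
    rw [rowD]
    simp [dld_zero_right a b ((X : Int) + 1) (by omega)]
  | succ Y ih =>
    have e0 : ((Y + 1 : Nat) : Int) + 1 = ((Y : Int) + 1) + 1 := by omega
    rw [e0, PySem.List.pyRange_one_succ_right (by omega), List.foldl_append, ih (by omega)]
    rw [List.foldl_cons, List.foldl_nil, rowD_succ]
    have e0' : ((Y + 1 : Nat) : Int) = (Y : Int) + 1 := by omega
    rw [e0']
    simp only [dldAltStep]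
    rw [dld]
    rw [if_neg (by omega : ¬ min ((X : Int) + 1) ((Y : Int) + 1) ≤ 0)]
    have e1 : ((X : Int) + 1 - 1) = (X : Int) := by ring
    have e2 : ((X : Int) + 1 - 2) = (X : Int) - 1 := by ring
    have e3 : ((Y : Int) + 1 - 1) = (Y : Int) := by ring
    have e4 : ((Y : Int) + 1 - 2) = (Y : Int) - 1 := by ring
    rw [e1, e2, e3, e4]
    rw [rowD_getI a b (X : Int) J ((Y : Int) + 1) (by omega) (by omega),
        rowD_getI a b ((X : Int) + 1) Y (Y : Int) (by omega) (by omega),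
        rowD_getI a b (X : Int) J (Y : Int) (by omega) (by omega)]
    by_cases hg : (1 < (X : Int) + 1 ∧ 1 < (Y : Int) + 1 ∧
        PySem.Str.pyGet? a (X : Int) = PySem.Str.pyGet? b ((Y : Int) - 1) ∧
        PySem.Str.pyGet? a ((X : Int) - 1) = PySem.Str.pyGet? b (Y : Int))
    · have hX1 : 1 ≤ X := by have := hg.1; omega
      have hY1 : 1 ≤ Y := by have := hg.2.1; omega
      rcases hp2 with h0 | hprev2
      · omega
      rw [hprev2, rowD_getI a b ((X : Int) - 1) J ((Y : Int) - 1) (by omega) (by omega)]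
      rw [if_pos hg, if_pos hg]
      simp
    · rw [if_neg hg, if_neg hg]
      simp

lemma outer_fold (a b : String) (J : Nat) :
    ∀ X : Nat,
    (PySem.List.pyRange 1 ((X : Int) + 1) 1).foldl
        (fun (s : List Int × List Int) x =>
          (s.2, (PySem.List.pyRange 1 ((J : Int) + 1) 1).foldl (dldAltStep a b x s.1 s.2) [x]))
        (([] : List Int), rowD a b 0 J)
      = ((if X = 0 then ([] : List Int) else rowD a b ((X : Int) - 1) J), rowD a b (X : Int) J) := by
  intro X
  induction X with
  | zero =>
    rw [Nat.cast_zero, zero_add,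
        show PySem.List.pyRange (1 : Int) 1 1 = ([] : List Int) from
          PySem.List.pyRange_one_eq_nil (by omega),
        List.foldl_nil]
    simp
  | succ X ih =>
    have e0 : ((X + 1 : Nat) : Int) + 1 = ((X : Int) + 1) + 1 := by omega
    rw [e0,
        show PySem.List.pyRange (1 : Int) (((X : Int) + 1) + 1) 1
            = PySem.List.pyRange 1 ((X : Int) + 1) 1 ++ [(X : Int) + 1] from
          PySem.List.pyRange_one_succ_right (by omega),
        List.foldl_append, ih]
    simp only [List.foldl_cons, List.foldl_nil]
    have hinner := inner_fold a b J X (if X = 0 then ([] : List Int) else rowD a b ((X : Int) - 1) J)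
      (by by_cases hX : X = 0
          · exact Or.inl hX
          · exact Or.inr (by rw [if_neg hX])) J le_rfl
    rw [hinner]
    have e1 : ((X + 1 : Nat) : Int) - 1 = (X : Int) := by omega
    have e2 : ((X + 1 : Nat) : Int) = (X : Int) + 1 := by omega
    simp [e2]

lemma init_row (a b : String) (J : Nat) :
    PySem.List.pyRange 0 ((J : Int) + 1) 1 = rowD a b 0 J := by
  rw [PySem.List.pyRange_one, rowD]
  have h : ((J : Int) + 1 - 0).toNat = J + 1 := by omega
  rw [h]
  apply List.map_congr_left
  intro k _
  rw [dld_zero_left a b (k : Int) (by positivity)]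
  ring

-- ===== VERDICT (by name: the statement is the Claim_ definition above) =====
theorem dld_spec : Claim_equal_dld := by
  intro a b i j _ hpre
  obtain ⟨hi, hj, _⟩ := hpre
  unfold Spec_dld
  by_cases h0 : min i j = 0
  · rw [dld, dld_alt, if_pos (by omega), if_pos h0]
  · obtain ⟨I, rfl⟩ := Int.eq_ofNat_of_zero_le hi
    obtain ⟨J, rfl⟩ := Int.eq_ofNat_of_zero_le hj
    simp only [dld_alt, if_neg h0]
    rw [init_row a b J, outer_fold a b J I]
    exact (rowD_getI a b (I : Int) J (J : Int) (by omega) (by omega)).symm
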